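-- pv_equiv track=rewrite | github.com/nickmarietta/EcoPrompt | backend/pipeline.py | parse_skeleton_block
-- ===== SOURCE A (Python) =====
-- def parse_skeleton_block(skeleton_text: str) -> dict[str, str]:
--     """Parse five-line skeleton into API skeleton object."""
--     keys_order = [
--         ("INTENT:", "intent"),
--         ("TASK:", "task"),
--         ("SUBJECT:", "subject"),
--         ("OUTPUT:", "output"),
--         ("PROMPT:", "prompt"),
--     ]
--     out: dict[str, str] = {v: "" for _, v in keys_order}
--     for line in skeleton_text.splitlines():
--         stripped = line.strip()
--         ul = stripped.upper()
--         for prefix, key in keys_order: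
--             if ul.startswith(prefix):
--                 out[key] = stripped.split(":", 1)[-1].strip()
--                 break
--     return out
-- ===== SOURCE B (Python) =====
-- def parse_skeleton_block(skeleton_text: str) -> dict[str, str]:
--     """Parse five-line skeleton into API skeleton object."""
--     keys_order = [
--         ("INTENT:", "intent"),
--         ("TASK:", "task"),
--         ("SUBJECT:", "subject"),
--         ("OUTPUT:", "output"),
--         ("PROMPT:", "prompt"),
--     ]
--     lines = [line.strip() for line in skeleton_text.splitlines()]
--     out: dict[str, str] = {}
--     for prefix, key in keys_order:
--         val = ""
--         for stripped in lines:
--             if stripped.upper().startswith(prefix):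
--                 val = stripped.split(":", 1)[-1].strip()
--         out[key] = val
--     return out
-- ===== Notes on version B (the rewrite author's own statement) =====
-- stated objective: alternative
-- what changed: Inverts the loop nesting: instead of one pass over the lines that updates a pre-seeded dict (first matching prefix wins per line, break), B scans the stripped lines once per (prefix, key) pair and keeps the last matching line's value (default ''), then builds the dict key by key.
import Mathlib
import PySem

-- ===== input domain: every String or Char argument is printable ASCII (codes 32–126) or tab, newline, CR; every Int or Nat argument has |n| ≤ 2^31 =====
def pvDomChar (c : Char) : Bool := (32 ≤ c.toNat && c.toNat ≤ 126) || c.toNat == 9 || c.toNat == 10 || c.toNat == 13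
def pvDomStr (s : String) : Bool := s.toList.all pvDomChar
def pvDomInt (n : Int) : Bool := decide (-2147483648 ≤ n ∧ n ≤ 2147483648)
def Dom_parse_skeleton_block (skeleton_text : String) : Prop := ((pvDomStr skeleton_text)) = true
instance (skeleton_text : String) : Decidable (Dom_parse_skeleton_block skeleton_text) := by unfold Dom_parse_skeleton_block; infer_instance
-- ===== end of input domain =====

-- B inverts A's loop nesting (one scan of the stripped lines per key, last match wins,
-- instead of one dict-updating pass over the lines); equal return values are proved below.

-- shared by both ports: the identical Python expression stripped.split(":", 1)[-1].strip()
def pvExtract (stripped : String) : String :=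
  -- sep ":" ≠ "" so split never raises; the resulting list is nonempty so [-1] never raises
  PySem.Str.strip (PySem.List.pyGetD ((PySem.Str.splitMax? stripped ":" 1).getD []) (-1) "")

-- ===== PORT A =====
def pvKeysOrder : List (String × String) :=
  [("INTENT:", "intent"), ("TASK:", "task"), ("SUBJECT:", "subject"),
   ("OUTPUT:", "output"), ("PROMPT:", "prompt")]

-- the inner 'for prefix, key in keys_order: … break' loop of A
def pvInnerA (stripped ul : String) :
    List (String × String) → PySem.Dict String String → PySem.Dict String String
  | [], out => out
  | (pfx, key) :: rest, out =>
      if PySem.Str.startswith ul pfx then out.insert key (pvExtract stripped)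
      else pvInnerA stripped ul rest out

-- the body of A's 'for line in skeleton_text.splitlines():' loop
def pvStepA (out : PySem.Dict String String) (line : String) : PySem.Dict String String :=
  let stripped := PySem.Str.strip line
  let ul := PySem.Str.upper stripped
  pvInnerA stripped ul pvKeysOrder out

def parse_skeleton_block (skeleton_text : String) : List (String × String) :=
  let init : PySem.Dict String String :=
    pvKeysOrder.foldl (fun d pk => d.insert pk.2 "") PySem.Dict.empty
  ((PySem.Str.splitlines skeleton_text).foldl pvStepA init).items

-- ===== PORT B =====
-- inner 'for stripped in lines:' loop of B: value of the last matching line, else acc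
def pvLastValB (pfx : String) : List String → String → String
  | [], acc => acc
  | stripped :: rest, acc =>
      pvLastValB pfx rest
        (if PySem.Str.startswith (PySem.Str.upper stripped) pfx then pvExtract stripped else acc)

def parse_skeleton_block_alt (skeleton_text : String) : List (String × String) :=
  let lines := (PySem.Str.splitlines skeleton_text).map PySem.Str.strip
  pvKeysOrder.map (fun pk => (pk.2, pvLastValB pk.1 lines ""))

-- ===== PRECONDITION & SPEC =====
def Spec_parse_skeleton_block (skeleton_text : String) (out : List (String × String)) : Prop := out = parse_skeleton_block_alt skeleton_text
instance (skeleton_text : String) (out : List (String × String)) : Decidable (Spec_parse_skeleton_block skeleton_text out) := by unfold Spec_parse_skeleton_block; infer_instance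

-- ===== CLAIM (what is proved, stated in full; the proofs are below) =====
def Claim_equal_parse_skeleton_block : Prop := ∀ (skeleton_text : String), Dom_parse_skeleton_block skeleton_text → Spec_parse_skeleton_block skeleton_text (parse_skeleton_block skeleton_text)

-- ===== LEMMAS AND PROOFS =====

-- two prefixes neither of which is a prefix of the other cannot both match
theorem pv_excl (l p q : List Char) (hpq : ¬ (p <+: q)) (hqp : ¬ (q <+: p))
    (hp : PySem.Chars.startswith l p = true) : PySem.Chars.startswith l q = false := by
  by_contra h
  rw [Bool.not_eq_false] at h
  rw [PySem.Chars.startswith_iff] at hp h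
  exact (List.prefix_or_prefix_of_prefix hp h).elim hpq hqp

-- one step of A's outer loop, as five independent conditional updates
-- (A's break is harmless: at most one of the five prefixes matches a given line)
theorem pv_step (line i t s o p : String) :
    pvStepA (PySem.Dict.mk [("intent", i), ("task", t), ("subject", s),
                            ("output", o), ("prompt", p)]) line
    = PySem.Dict.mk
        [("intent", if PySem.Str.startswith (PySem.Str.upper (PySem.Str.strip line)) "INTENT:"
                    then pvExtract (PySem.Str.strip line) else i),
         ("task", if PySem.Str.startswith (PySem.Str.upper (PySem.Str.strip line)) "TASK:"
                  then pvExtract (PySem.Str.strip line) else t),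
         ("subject", if PySem.Str.startswith (PySem.Str.upper (PySem.Str.strip line)) "SUBJECT:"
                     then pvExtract (PySem.Str.strip line) else s),
         ("output", if PySem.Str.startswith (PySem.Str.upper (PySem.Str.strip line)) "OUTPUT:"
                    then pvExtract (PySem.Str.strip line) else o),
         ("prompt", if PySem.Str.startswith (PySem.Str.upper (PySem.Str.strip line)) "PROMPT:"
                    then pvExtract (PySem.Str.strip line) else p)] := by
  have hI := (PySem.Chars.startswith (PySem.Chars.upper (PySem.Chars.strip line.toList)) ['I','N','T','E','N','T',':']).eq_false_or_eq_true
  have hT := (PySem.Chars.startswith (PySem.Chars.upper (PySem.Chars.strip line.toList)) ['T','A','S','K',':']).eq_false_or_eq_true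
  have hS := (PySem.Chars.startswith (PySem.Chars.upper (PySem.Chars.strip line.toList)) ['S','U','B','J','E','C','T',':']).eq_false_or_eq_true
  have hO := (PySem.Chars.startswith (PySem.Chars.upper (PySem.Chars.strip line.toList)) ['O','U','T','P','U','T',':']).eq_false_or_eq_true
  have hP := (PySem.Chars.startswith (PySem.Chars.upper (PySem.Chars.strip line.toList)) ['P','R','O','M','P','T',':']).eq_false_or_eq_true
  rcases hI with h1 | h1
  · have h2 := pv_excl _ _ ['T','A','S','K',':'] (by decide) (by decide) h1
    have h3 := pv_excl _ _ ['S','U','B','J','E','C','T',':'] (by decide) (by decide) h1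
    have h4 := pv_excl _ _ ['O','U','T','P','U','T',':'] (by decide) (by decide) h1
    have h5 := pv_excl _ _ ['P','R','O','M','P','T',':'] (by decide) (by decide) h1
    simp [pvStepA, pvInnerA, pvKeysOrder, h1, h2, h3, h4, h5, PySem.Dict.insert]
  · rcases hT with h2 | h2
    · have h3 := pv_excl _ _ ['S','U','B','J','E','C','T',':'] (by decide) (by decide) h2
      have h4 := pv_excl _ _ ['O','U','T','P','U','T',':'] (by decide) (by decide) h2
      have h5 := pv_excl _ _ ['P','R','O','M','P','T',':'] (by decide) (by decide) h2
      simp [pvStepA, pvInnerA, pvKeysOrder, h1, h2, h3, h4, h5, PySem.Dict.insert]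
    · rcases hS with h3 | h3
      · have h4 := pv_excl _ _ ['O','U','T','P','U','T',':'] (by decide) (by decide) h3
        have h5 := pv_excl _ _ ['P','R','O','M','P','T',':'] (by decide) (by decide) h3
        simp [pvStepA, pvInnerA, pvKeysOrder, h1, h2, h3, h4, h5, PySem.Dict.insert]
      · rcases hO with h4 | h4
        · have h5 := pv_excl _ _ ['P','R','O','M','P','T',':'] (by decide) (by decide) h4
          simp [pvStepA, pvInnerA, pvKeysOrder, h1, h2, h3, h4, h5, PySem.Dict.insert]
        · rcases hP with h5 | h5
          · simp [pvStepA, pvInnerA, pvKeysOrder, h1, h2, h3, h4, h5, PySem.Dict.insert]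
          · simp [pvStepA, pvInnerA, pvKeysOrder, h1, h2, h3, h4, h5]

-- A's whole fold, tracked per key
theorem pv_main (lines : List String) (i t s o p : String) :
    ((lines.foldl pvStepA
        (PySem.Dict.mk [("intent", i), ("task", t), ("subject", s),
                        ("output", o), ("prompt", p)])).items)
    = [("intent", pvLastValB "INTENT:" (lines.map PySem.Str.strip) i),
       ("task", pvLastValB "TASK:" (lines.map PySem.Str.strip) t),
       ("subject", pvLastValB "SUBJECT:" (lines.map PySem.Str.strip) s),
       ("output", pvLastValB "OUTPUT:" (lines.map PySem.Str.strip) o),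
       ("prompt", pvLastValB "PROMPT:" (lines.map PySem.Str.strip) p)] := by
  induction lines generalizing i t s o p with
  | nil => simp [pvLastValB]
  | cons line rest ih =>
      simp only [List.foldl_cons, List.map_cons, pvLastValB]
      rw [pv_step, ih]

-- ===== VERDICT (by name: the statement is the Claim_ definition above) =====
theorem parse_skeleton_block_spec : Claim_equal_parse_skeleton_block := by
  intro skeleton_text _
  unfold Spec_parse_skeleton_block parse_skeleton_block parse_skeleton_block_alt
  have hinit :
      (pvKeysOrder.foldl (fun d pk => d.insert pk.2 "") PySem.Dict.empty)
      = PySem.Dict.mk [("intent", ""), ("task", ""), ("subject", ""),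
                       ("output", ""), ("prompt", "")] := by decide
  rw [hinit, pv_main]
  simp [pvKeysOrder]
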